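-- pv_equiv track=rewrite | github.com/leonardoWer/Algosi-2sem-2025 | lab1/task7/src/task7.py | shoemaker_problem
-- ===== SOURCE A (Python) =====
-- def shoemaker_problem(k:int, n:int, t:list) -> int:
--     cnt = 0
--     summ = 0
--     # Если время первой пары сапог > рабочий день, то рабочий сделает 0 пар
--     if t[0] > k:
--         cnt = 0
--     else:
--         for i in range(n):
--             while summ <= k:
--                 summ += t[i]
--                 cnt += 1
--     return cnt
-- ===== SOURCE B (Python) =====
-- def shoemaker_problem(k: int, n: int, t: list) -> int:
--     # closed form: the loop adds t[0] until the running sum exceeds k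
--     if t[0] > k or n <= 0 or k < 0:
--         return 0
--     return k // t[0] + 1
-- ===== Notes on version B (the rewrite author's own statement) =====
-- stated objective: simpler
-- what changed: Replaces the inner counting loop (repeatedly adding t[0] until the sum exceeds k) by the closed form k // t[0] + 1 (0 if t[0] > k, n <= 0 or k < 0).
import Mathlib
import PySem

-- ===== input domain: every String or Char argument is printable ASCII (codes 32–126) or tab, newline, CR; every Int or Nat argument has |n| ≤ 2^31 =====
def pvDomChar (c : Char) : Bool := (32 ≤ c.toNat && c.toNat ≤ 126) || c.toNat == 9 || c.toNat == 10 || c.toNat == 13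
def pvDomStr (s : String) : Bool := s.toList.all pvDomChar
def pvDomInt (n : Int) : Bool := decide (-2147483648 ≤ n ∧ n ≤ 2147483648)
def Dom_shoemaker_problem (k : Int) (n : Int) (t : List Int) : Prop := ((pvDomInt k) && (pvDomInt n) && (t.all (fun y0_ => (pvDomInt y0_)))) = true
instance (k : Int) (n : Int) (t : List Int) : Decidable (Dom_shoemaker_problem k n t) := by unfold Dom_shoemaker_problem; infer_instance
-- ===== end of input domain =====

-- B replaces the inner counting loop by the closed form k // t[0] + 1 (simpler).

-- ===== PORT A =====
-- inner 'while summ <= k: summ += t[i]; cnt += 1', fuel-bounded for totality only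
-- (under Pre_ the fuel never runs out; see shoemakerWhile_spec below)
def shoemakerWhile (k : Int) (ti : Int) : Int → Int → Nat → Int × Int
  | summ, cnt, 0 => (summ, cnt)
  | summ, cnt, Nat.succ fuel =>
      if summ ≤ k then shoemakerWhile k ti (summ + ti) (cnt + 1) fuel
      else (summ, cnt)

def shoemaker_problem (k : Int) (n : Int) (t : List Int) : Int :=
  -- t[0]: Python raises IndexError on an empty list; Pre_ excludes that
  let t0 := PySem.List.pyGetD t 0 0
  if t0 > k then 0
  else
    -- for i in range(n): while summ <= k: summ += t[i]; cnt += 1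
    let st := (PySem.List.pyRange 0 n 1).foldl
      (fun (st : Int × Int) i =>
        shoemakerWhile k (PySem.List.pyGetD t i 0) st.1 st.2 ((k - st.1).toNat + 1))
      (0, 0)
    st.2

-- ===== PORT B =====
def shoemaker_problem_alt (k : Int) (n : Int) (t : List Int) : Int :=
  let t0 := PySem.List.pyGetD t 0 0
  if t0 > k ∨ n ≤ 0 ∨ k < 0 then 0
  else PySem.Int.floordiv k t0 + 1

-- ===== PRECONDITION & SPEC =====
-- Pre_ excludes exactly the inputs where A does not return: the empty list (IndexError on t[0])
-- and 0 ≤ k with t[0] ≤ 0 ≤ k and n ≥ 1, where A's while loop never terminates.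
def Pre_shoemaker_problem (k : Int) (n : Int) (t : List Int) : Prop :=
  t ≠ [] ∧ (k < t.headI ∨ n ≤ 0 ∨ 0 < t.headI ∨ k < 0)
instance (k : Int) (n : Int) (t : List Int) : Decidable (Pre_shoemaker_problem k n t) := by
  unfold Pre_shoemaker_problem; infer_instance

def pvWitness_shoemaker_problem : Int × Int × List Int := (10, 2, [3, 4])

def Spec_shoemaker_problem (k : Int) (n : Int) (t : List Int) (out : Int) : Prop := out = shoemaker_problem_alt k n t
instance (k : Int) (n : Int) (t : List Int) (out : Int) : Decidable (Spec_shoemaker_problem k n t out) := by unfold Spec_shoemaker_problem; infer_instance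

-- ===== CLAIM (what is proved, stated in full; the proofs are below) =====
def Claim_equal_shoemaker_problem : Prop := ∀ (k : Int) (n : Int) (t : List Int), Dom_shoemaker_problem k n t → Pre_shoemaker_problem k n t → Spec_shoemaker_problem k n t (shoemaker_problem k n t)

-- ===== LEMMAS AND PROOFS =====

-- the while loop with positive step: final sum exceeds k, and the count is (k - summ)/d + 1
theorem shoemakerWhile_spec (k d : Int) (hd : 0 < d) :
    ∀ (fuel : Nat) (summ cnt : Int), (summ ≤ k → (k - summ).toNat < fuel) →
      k < (shoemakerWhile k d summ cnt fuel).1 ∧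
      (shoemakerWhile k d summ cnt fuel).2 =
        cnt + (if summ ≤ k then (k - summ) / d + 1 else 0) := by
  intro fuel
  induction fuel with
  | zero =>
      intro summ cnt h
      by_cases hle : summ ≤ k
      · exact absurd (h hle) (by omega)
      · simp [shoemakerWhile, hle]; omega
  | succ f ih =>
      intro summ cnt h
      by_cases hle : summ ≤ k
      · have hstep := ih (summ + d) (cnt + 1) (by intro h2; have := h hle; omega)
        simp only [shoemakerWhile, hle, if_pos]
        refine ⟨hstep.1, ?_⟩
        rw [hstep.2]
        by_cases h2 : summ + d ≤ k
        · simp only [h2, if_pos, hle, if_pos]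
          have : (k - summ - d) / d = (k - summ) / d - 1 := by
            have := Int.add_mul_ediv_right (k - summ) (-1) (by omega : d ≠ 0)
            have e : k - summ + -1 * d = k - summ - d := by ring
            rw [e] at this; omega
          have e : k - (summ + d) = k - summ - d := by ring
          rw [e, this]; ring
        · simp only [h2, if_neg, not_false_iff, hle, if_pos]
          have hz : (k - summ) / d = 0 :=
            Int.ediv_eq_zero_of_lt (by omega) (by omega)
          rw [hz]; omega
      · simp [shoemakerWhile, hle]; omega

-- once the sum exceeds k, every remaining iteration of the for loop is the identity
theorem foldl_while_gt (k : Int) (t : List Int) :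
    ∀ (l : List Int) (s c : Int), k < s →
      l.foldl (fun (st : Int × Int) i =>
          shoemakerWhile k (PySem.List.pyGetD t i 0) st.1 st.2 ((k - st.1).toNat + 1)) (s, c)
        = (s, c) := by
  intro l
  induction l with
  | nil => intro s c _; rfl
  | cons x xs ih =>
      intro s c hs
      have hnot : ¬ s ≤ k := by omega
      simp only [List.foldl_cons, shoemakerWhile, hnot, if_neg, not_false_iff]
      exact ih s c hs

-- ===== VERDICT (by name: the statement is the Claim_ definition above) =====
theorem shoemaker_problem_spec : Claim_equal_shoemaker_problem := by
  intro k n t _ hpre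
  obtain ⟨hne, hcase⟩ := hpre
  obtain ⟨t0, rest, rfl⟩ : ∃ a l, t = a :: l := by
    cases t with
    | nil => exact absurd rfl hne
    | cons a l => exact ⟨a, l, rfl⟩
  simp only [List.headI] at hcase
  unfold Spec_shoemaker_problem shoemaker_problem shoemaker_problem_alt
  simp only [PySem.List.pyGetD_zero_cons]
  by_cases h1 : t0 > k
  · simp [h1]
  · rw [if_neg h1]
    by_cases h2 : n ≤ 0
    · rw [PySem.List.pyRange_one_eq_nil (by omega : n ≤ 0)]
      simp [h2]
    · by_cases h3 : k < 0
      · -- negative workday: the while condition 0 ≤ k is false from the start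
        rw [foldl_while_gt k (t0 :: rest) _ 0 0 h3]
        simp [h3]
      · -- n ≥ 1 and 0 < t0 ≤ k
        have ht0 : 0 < t0 := by rcases hcase with h | h | h | h <;> omega
        rw [PySem.List.pyRange_one_cons (by omega : (0:Int) < n)]
        simp only [List.foldl_cons, PySem.List.pyGetD_zero_cons]
        have hspec := shoemakerWhile_spec k t0 ht0 ((k - 0).toNat + 1) 0 0 (by omega)
        obtain ⟨hgt, hcnt⟩ := hspec
        rw [foldl_while_gt k (t0 :: rest) _ _ _ hgt, hcnt]
        have hle : (0:Int) ≤ k := by omega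
        simp only [hle, if_pos, sub_zero, PySem.Int.floordiv_eq_ediv_of_pos ht0, h1, h2, h3,
          or_self, if_neg, not_false_iff, if_false]
        omega
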